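-- pv_equiv track=rewrite | github.com/ksamokhin/python | Lesson4/task6.py | iterator2
-- ===== SOURCE A (Python) =====
-- from itertools import cycle
--
-- def iterator2(str):
--     stop = 0
--     list = []
--     for el in cycle(str):
--         list.append(el)
--         stop += 1
--         if stop > 10:
--             break
--     return list
-- ===== SOURCE B (Python) =====
-- def iterator2(str):
--     items = list(str)
--     return (items * 11)[:11]
-- ===== Notes on version B (the rewrite author's own statement) =====
-- stated objective: simpler
-- what changed: Replaces the itertools.cycle loop with a counter and break by materializing the input once and slicing the first 11 elements of the 11-fold repetition, with no loop or counter.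
import Mathlib
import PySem

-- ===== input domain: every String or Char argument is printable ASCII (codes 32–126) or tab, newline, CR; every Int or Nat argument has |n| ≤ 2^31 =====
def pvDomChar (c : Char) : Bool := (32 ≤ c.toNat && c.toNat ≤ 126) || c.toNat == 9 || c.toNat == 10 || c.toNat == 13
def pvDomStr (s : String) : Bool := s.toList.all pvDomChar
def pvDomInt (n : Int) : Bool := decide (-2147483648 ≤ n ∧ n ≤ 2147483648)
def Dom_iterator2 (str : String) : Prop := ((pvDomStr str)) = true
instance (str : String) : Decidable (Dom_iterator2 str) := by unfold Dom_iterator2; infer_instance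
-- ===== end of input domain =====

-- ===== PORT A =====
-- B changes A's cycle loop into "repeat the list 11 times and slice"; objective: simpler.
-- A-side helper: the `for el in cycle(str): append; stop += 1; if stop > 10: break` loop,
-- with fuel = 11 remaining appends; the `[]` case of `all` is cycle('') exhausting (loop ends).
def iterCycleGo : Nat → List Char → List Char → List String
  | 0, _, _ => []
  | n+1, all, [] =>
      match all with
      | [] => []
      | a :: as => String.mk [a] :: iterCycleGo n all as
  | n+1, all, x :: rest => String.mk [x] :: iterCycleGo n all rest

def iterator2 (str : String) : List String :=
  iterCycleGo 11 str.toList str.toList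

-- ===== PORT B =====
-- items = list(str); return (items * 11)[:11]
def iterator2_alt (str : String) : List String :=
  let items := str.toList.map (fun c => String.mk [c])
  ((List.replicate 11 items).flatten).take 11

-- ===== PRECONDITION & SPEC =====
def Spec_iterator2 (str : String) (out : List String) : Prop := out = iterator2_alt str
instance (str : String) (out : List String) : Decidable (Spec_iterator2 str out) := by unfold Spec_iterator2; infer_instance

-- ===== CLAIM (what is proved, stated in full; the proofs are below) =====
def Claim_equal_iterator2 : Prop := ∀ (str : String), Dom_iterator2 str → Spec_iterator2 str (iterator2 str)

-- ===== LEMMAS AND PROOFS =====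

-- ===== VERDICT (by name: the statement is the Claim_ definition above) =====
-- take n is unchanged when one copy of b is dropped from the tail, given enough length before it.
lemma take_trim {α : Type} (n m : Nat) (as b : List α)
    (h : n ≤ as.length + m * b.length) :
    (as ++ (List.replicate (m+1) b).flatten).take n
      = (as ++ (List.replicate m b).flatten).take n := by
  rw [List.replicate_succ', List.flatten_append, ← List.append_assoc]
  have hlen : n ≤ (as ++ (List.replicate m b).flatten).length := by
    simp [List.length_flatten, List.map_replicate, List.sum_replicate] at *
    omega
  rw [List.take_append_of_le_length hlen]

lemma iterCycleGo_eq (n : Nat) : ∀ (all cur : List Char), all ≠ [] →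
    iterCycleGo n all cur
      = (cur.map (fun c => String.mk [c])
          ++ (List.replicate n (all.map (fun c => String.mk [c]))).flatten).take n := by
  induction n with
  | zero => intro all cur _; simp [iterCycleGo]
  | succ n ih =>
    intro all cur hall
    cases cur with
    | nil =>
      cases all with
      | nil => exact absurd rfl hall
      | cons a as =>
        simp only [iterCycleGo, List.map_nil, List.nil_append, List.replicate_succ,
          List.flatten_cons, List.map_cons, List.cons_append, List.take_succ_cons]
        rw [ih (a :: as) as (by simp)]
        simp
    | cons x rest =>
      simp only [iterCycleGo, List.map_cons, List.cons_append, List.take_succ_cons]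
      rw [ih all rest hall, take_trim n n (rest.map (fun c => String.mk [c]))]
      have : 1 ≤ (all.map (fun c => String.mk [c])).length := by
        cases all with
        | nil => exact absurd rfl hall
        | cons a as => simp
      calc n ≤ n * (all.map (fun c => String.mk [c])).length := Nat.le_mul_of_pos_right n this
        _ ≤ _ := Nat.le_add_left _ _

lemma iterCycleGo_all (n : Nat) (all : List Char) (h : all ≠ []) :
    iterCycleGo (n+1) all all
      = ((List.replicate (n+1) (all.map (fun c => String.mk [c]))).flatten).take (n+1) := by
  rw [iterCycleGo_eq (n+1) all all h, List.replicate_succ, List.flatten_cons]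
  refine take_trim (n+1) n _ _ ?_
  cases all with
  | nil => exact absurd rfl h
  | cons a as =>
    simp only [List.map_cons, List.length_cons, List.length_map]
    have := Nat.le_mul_of_pos_right n (show 0 < as.length + 1 by omega)
    omega

theorem iterator2_spec : Claim_equal_iterator2 := by
  intro str _
  unfold Spec_iterator2 iterator2 iterator2_alt
  dsimp only
  cases h : str.toList with
  | nil => simp [iterCycleGo]
  | cons c cs => exact iterCycleGo_all 10 (c :: cs) (by simp)
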